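-- pv_equiv track=rewrite | github.com/NicolasADavid/PythonChallenges | Facebook/get-milestones-days.py | getMilestoneDays
-- ===== SOURCE A (Python) =====
-- def getMilestoneDays(revenues, milestones):
--
--     miles_idx = {}
--
--     # O(K)
--     for idx, milestone in enumerate(milestones):
--        miles_idx[milestone] = idx
--
--     # O(KlogK)
--     milestones = list(reversed(sorted(milestones)))
--
--     ans = [-1]*len(milestones)
--
--     total = 0
--
--     # O(N)
--     for idx, rev in enumerate(revenues):
--         total += rev
--
--         if milestones:
--             while milestones[-1] <= total:
--                 ans[miles_idx[milestones[-1]]] = idx + 1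
--                 milestones.pop()
--                 if not milestones: break
--
--     return ans
-- ===== SOURCE B (Python) =====
-- def getMilestoneDays(revenues, milestones):
--     last_index = {m: i for i, m in enumerate(milestones)}
--     ans = [-1] * len(milestones)
--     for m, i in last_index.items():
--         total = 0
--         for d, r in enumerate(revenues):
--             total += r
--             if total >= m:
--                 ans[i] = d + 1
--                 break
--     return ans
-- ===== Notes on version B (the rewrite author's own statement) =====
-- stated objective: simpler
-- what changed: Replaces A's sort + pop-from-stack single sweep over the revenues by a value-to-index dict driving an independent rescan of the revenues per distinct milestone, writing the first day its running total reaches the milestone.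
import Mathlib
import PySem

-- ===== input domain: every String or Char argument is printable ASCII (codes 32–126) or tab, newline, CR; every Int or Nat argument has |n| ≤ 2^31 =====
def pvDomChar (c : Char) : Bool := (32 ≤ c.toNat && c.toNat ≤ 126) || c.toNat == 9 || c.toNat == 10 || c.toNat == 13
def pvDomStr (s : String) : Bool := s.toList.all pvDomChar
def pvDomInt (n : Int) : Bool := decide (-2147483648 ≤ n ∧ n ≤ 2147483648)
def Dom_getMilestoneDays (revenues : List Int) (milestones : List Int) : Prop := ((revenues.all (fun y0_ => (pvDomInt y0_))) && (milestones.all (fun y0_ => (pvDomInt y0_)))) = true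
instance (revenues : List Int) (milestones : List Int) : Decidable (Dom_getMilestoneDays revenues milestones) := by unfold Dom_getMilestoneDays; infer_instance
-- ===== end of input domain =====

-- B replaces A's sort + pop-stack sweep by a value→index dict driving an independent
-- rescan of the revenues per distinct milestone; objective: simpler, same values everywhere.

-- ===== PORT A =====
-- the inner `while milestones[-1] <= total: …` loop (pop from the end, record day idx+1);
-- `miles_idx[m]` is ported as getD: the key is always present (every stack element came from milestones)
def popA (midx : PySem.Dict Int Int) (total v : Int) (stack ans : List Int) : List Int × List Int :=
  match h : stack.getLast? with
  | none => (stack, ans)                 -- `if not milestones: break`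
  | some m =>
    if m ≤ total then
      popA midx total v stack.dropLast (ans.set (midx.getD m 0).toNat v)
    else (stack, ans)
termination_by stack.length
decreasing_by
  have hne : stack ≠ [] := by intro hn; rw [hn] at h; simp at h
  have := List.length_pos_of_ne_nil hne
  simp [List.length_dropLast]; omega

-- one day of the `for idx, rev in enumerate(revenues)` loop; state = (total, milestones stack, ans)
def stepA (midx : PySem.Dict Int Int) (s : Int × List Int × List Int) (p : Int × Int) :
    Int × List Int × List Int :=
  let total := s.1 + p.2
  if s.2.1.isEmpty then (total, s.2.1, s.2.2)
  else
    let q := popA midx total (p.1 + 1) s.2.1 s.2.2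
    (total, q.1, q.2)

def getMilestoneDays (revenues : List Int) (milestones : List Int) : List Int :=
  let midx := (PySem.List.enumerate milestones 0).foldl
      (fun d p => d.insert p.2 p.1) (PySem.Dict.empty : PySem.Dict Int Int)
  let ms2 := (PySem.List.sorted milestones (fun x => x) false).reverse
  let ans := List.replicate ms2.length (-1 : Int)
  let st := (PySem.List.enumerate revenues 0).foldl (stepA midx) (0, ms2, ans)
  st.2.2

-- ===== PORT B =====
-- the inner `for d, r in enumerate(revenues): total += r; if total >= m: ans[i] = d+1; break`
def scanB (m i : Int) (total : Int) (ans : List Int) : List (Int × Int) → List Int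
  | [] => ans
  | (d, r) :: rest =>
    let t := total + r
    if m ≤ t then ans.set i.toNat (d + 1) else scanB m i t ans rest

def getMilestoneDays_alt (revenues : List Int) (milestones : List Int) : List Int :=
  let lastIndex := (PySem.List.enumerate milestones 0).foldl
      (fun d p => d.insert p.2 p.1) (PySem.Dict.empty : PySem.Dict Int Int)
  lastIndex.items.foldl
    (fun ans p => scanB p.1 p.2 0 ans (PySem.List.enumerate revenues 0))
    (List.replicate milestones.length (-1 : Int))

-- ===== PRECONDITION & SPEC =====
def Spec_getMilestoneDays (revenues : List Int) (milestones : List Int) (out : List Int) : Prop := out = getMilestoneDays_alt revenues milestones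
instance (revenues : List Int) (milestones : List Int) (out : List Int) : Decidable (Spec_getMilestoneDays revenues milestones out) := by unfold Spec_getMilestoneDays; infer_instance

-- ===== CLAIM (what is proved, stated in full; the proofs are below) =====
def Claim_equal_getMilestoneDays : Prop := ∀ (revenues : List Int) (milestones : List Int), Dom_getMilestoneDays revenues milestones → Spec_getMilestoneDays revenues milestones (getMilestoneDays revenues milestones)

-- ===== LEMMAS AND PROOFS =====

-- first 0-based day offset (within rs, starting from running total `total`) at which the
-- cumulative total reaches m
def reach (m total : Int) : List Int → Option Nat
  | [] => none
  | r :: rs => if m ≤ total + r then some 0 else (reach m (total + r) rs).map (· + 1)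

-- the intended answer for milestone m
def Fval (revs : List Int) (m : Int) : Int :=
  match reach m 0 revs with
  | some k => (k : Int) + 1
  | none => -1

-- index of the LAST occurrence of x in l (meaningful when x ∈ l)
def lastIdx (x : Int) : List Int → Nat
  | [] => 0
  | _ :: l => if x ∈ l then lastIdx x l + 1 else 0

theorem lastIdx_lt {x : Int} : ∀ {l : List Int}, x ∈ l → lastIdx x l < l.length := by
  intro l
  induction l with
  | nil => intro h; simp at h
  | cons a l ih =>
    intro h
    by_cases hx : x ∈ l
    · simp [lastIdx, hx]; exact ih hx
    · have : x = a := (List.mem_cons.1 h).resolve_right hx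
      simp [lastIdx, hx]

theorem getElem?_lastIdx {x : Int} : ∀ {l : List Int}, x ∈ l → l[lastIdx x l]? = some x := by
  intro l
  induction l with
  | nil => intro h; simp at h
  | cons a l ih =>
    intro h
    by_cases hx : x ∈ l
    · simp [lastIdx, hx]; exact ih hx
    · have hxa : x = a := (List.mem_cons.1 h).resolve_right hx
      subst hxa
      simp [lastIdx, hx]

theorem not_mem_drop_lastIdx {x : Int} : ∀ {l : List Int}, x ∉ l.drop (lastIdx x l + 1) := by
  intro l
  induction l with
  | nil => simp
  | cons a l ih =>
    by_cases hx : x ∈ l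
    · simpa [lastIdx, hx] using ih
    · simpa [lastIdx, hx] using hx

theorem lastIdx_unique {x : Int} : ∀ {l : List Int} {j : Nat}, l[j]? = some x →
    x ∉ l.drop (j + 1) → j = lastIdx x l := by
  intro l
  induction l with
  | nil => intro j h; simp at h
  | cons a l ih =>
    intro j h hd
    cases j with
    | zero =>
      have hax : a = x := by simpa using h
      have hx : x ∉ l := by simpa using hd
      simp [lastIdx, hx]
    | succ j =>
      have h' : l[j]? = some x := by simpa using h
      have hd' : x ∉ l.drop (j + 1) := by simpa using hd
      have hx : x ∈ l := by
        have := List.getElem?_eq_some_iff.1 h'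
        rcases this with ⟨hj, he⟩
        exact he ▸ List.getElem_mem hj
      simp [lastIdx, hx, ih h' hd']

-- the dict loop: value → last index (starting offset s)
theorem dictA_get? : ∀ (ms : List Int) (s : Int) (d : PySem.Dict Int Int) (x : Int),
    ((PySem.List.enumerate ms s).foldl (fun d p => d.insert p.2 p.1) d).get? x =
      if x ∈ ms then some (s + (lastIdx x ms : Int)) else d.get? x := by
  intro ms
  induction ms with
  | nil => intro s d x; simp [PySem.List.enumerate_nil]
  | cons m rest ih =>
    intro s d x
    rw [PySem.List.enumerate_cons, List.foldl_cons, ih]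
    by_cases hx : x ∈ rest
    · have : x ∈ m :: rest := List.mem_cons_of_mem _ hx
      simp only [hx, if_true, this, lastIdx]
      congr 1
      push_cast
      ring
    · by_cases hxm : x = m
      · subst hxm
        simp [hx, lastIdx, PySem.Dict.get?_insert]
      · simp [hx, hxm, lastIdx, PySem.Dict.get?_insert]

theorem posA_eq {ms : List Int} {m : Int} (hm : m ∈ ms) :
    (((PySem.List.enumerate ms 0).foldl (fun d p => d.insert p.2 p.1)
        (PySem.Dict.empty : PySem.Dict Int Int)).getD m 0).toNat = lastIdx m ms := by
  rw [PySem.Dict.getD_eq_get?_getD, dictA_get?]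
  simp [hm]

-- the inner scan of B: first day (within rs, offset s, running total `total`) reaching m
theorem scanB_eq (m i : Int) : ∀ (rs : List Int) (total s : Int) (ans : List Int),
    scanB m i total ans (PySem.List.enumerate rs s) =
      match reach m total rs with
      | some k => ans.set i.toNat (s + (k : Int) + 1)
      | none => ans := by
  intro rs
  induction rs with
  | nil => intro total s ans; simp [PySem.List.enumerate_nil, scanB, reach]
  | cons r rs ih =>
    intro total s ans
    rw [PySem.List.enumerate_cons]
    simp only [scanB]
    by_cases hc : m ≤ total + r
    · simp [hc, reach]
    · rw [if_neg hc, ih]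
      simp only [reach, if_neg hc]
      cases hr : reach m (total + r) rs with
      | none => simp
      | some k => simp; congr 1; push_cast; ring

theorem popA_eq (midx : PySem.Dict Int Int) (t v : Int) :
    ∀ (asc : List Int) (ans : List Int),
    popA midx t v asc.reverse ans =
      ((asc.dropWhile (fun x => decide (x ≤ t))).reverse,
       (asc.takeWhile (fun x => decide (x ≤ t))).foldl
         (fun a m => a.set (midx.getD m 0).toNat v) ans) := by
  intro asc
  induction asc with
  | nil => intro ans; rw [popA]; simp
  | cons a l ih =>
    intro ans
    rw [popA]
    split
    · rename_i h
      rw [List.reverse_cons, List.getLast?_concat] at h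
      exact absurd h (by simp)
    · rename_i m h
      rw [List.reverse_cons, List.getLast?_concat] at h
      injection h with hma
      subst hma
      by_cases hat : a ≤ t
      · rw [if_pos hat, List.reverse_cons, List.dropLast_concat, ih]
        simp [List.takeWhile_cons, List.dropWhile_cons, hat]
      · rw [if_neg hat, List.reverse_cons]
        simp [List.takeWhile_cons, List.dropWhile_cons, hat]

theorem dropWhile_gt {t : Int} : ∀ {asc : List Int}, asc.Pairwise (· ≤ ·) →
    ∀ x ∈ asc.dropWhile (fun x => decide (x ≤ t)), t < x := by
  intro asc
  induction asc with
  | nil => simp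
  | cons a l ih =>
    intro hp x hx
    rcases List.pairwise_cons.1 hp with ⟨ha, hl⟩
    by_cases hat : a ≤ t
    · exact ih hl x (by simpa [List.dropWhile, hat] using hx)
    · push_neg at hat
      rw [List.dropWhile_cons_of_neg (by simpa using hat.not_ge)] at hx
      rcases List.mem_cons.1 hx with h1 | h2
      · exact h1 ▸ hat
      · exact lt_of_lt_of_le hat (ha x h2)

theorem foldl_skip {α β : Type} (l : List α) (ans : β) : l.foldl (fun a _ => a) ans = ans := by
  induction l with
  | nil => rfl
  | cons a l ih => simpa using ih

-- main loop invariant for A's day loop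
theorem dayLoop_eq (midx : PySem.Dict Int Int) :
    ∀ (rs : List Int) (i total : Int) (stack ans : List Int),
    stack.reverse.Pairwise (· ≤ ·) →
    ((PySem.List.enumerate rs i).foldl (stepA midx) (total, stack, ans)).2.2 =
      stack.reverse.foldl
        (fun a m =>
          match reach m total rs with
          | some k => a.set (midx.getD m 0).toNat (i + (k : Int) + 1)
          | none => a) ans := by
  intro rs
  induction rs with
  | nil =>
    intro i total stack ans _
    rw [PySem.List.enumerate_nil, List.foldl_nil]
    show ans = _
    exact Eq.symm (Eq.trans
      (PySem.List.foldl_congr_mem _ _ (fun a _ => a) ans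
        (fun acc x _ => by simp [reach]))
      (foldl_skip _ _))
  | cons r rs ih =>
    intro i total stack ans hp
    rw [PySem.List.enumerate_cons, List.foldl_cons]
    by_cases hst : stack = []
    · subst hst
      have h1 : stepA midx (total, ([] : List Int), ans) (i, r) = (total + r, [], ans) := by
        simp [stepA]
      rw [h1, ih (i + 1) (total + r) [] ans (by simp)]
      simp
    · have hpop := popA_eq midx (total + r) (i + 1) stack.reverse ans
      rw [List.reverse_reverse] at hpop
      have h1 : stepA midx (total, stack, ans) (i, r) =
          (total + r,
           (stack.reverse.dropWhile (fun x => decide (x ≤ total + r))).reverse,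
           (stack.reverse.takeWhile (fun x => decide (x ≤ total + r))).foldl
             (fun a m => a.set (midx.getD m 0).toNat (i + 1)) ans) := by
        simp only [stepA, List.isEmpty_iff, hst, if_neg, hpop]
        simp [hst]
      rw [h1]
      have hpw : ((stack.reverse.dropWhile (fun x => decide (x ≤ total + r))).reverse).reverse.Pairwise
          (· ≤ ·) := by
        rw [List.reverse_reverse]
        exact List.Pairwise.sublist (List.dropWhile_sublist _) hp
      rw [ih (i + 1) (total + r) _ _ hpw]
      rw [List.reverse_reverse]
      -- right-hand side: split stack.reverse at the takeWhile/dropWhile point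
      conv_rhs => rw [← List.takeWhile_append_dropWhile
        (p := fun x => decide (x ≤ total + r)) (l := stack.reverse)]
      rw [List.foldl_append]
      -- the popped part: each element is ≤ total + r, so reach … = some 0
      have htk : List.foldl
          (fun a m => match reach m total (r :: rs) with
            | some k => a.set (midx.getD m 0).toNat (i + (k : Int) + 1)
            | none => a) ans
          (List.takeWhile (fun x => decide (x ≤ total + r)) stack.reverse)
          = List.foldl (fun a m => a.set (midx.getD m 0).toNat (i + 1)) ans
            (List.takeWhile (fun x => decide (x ≤ total + r)) stack.reverse) := by
        refine PySem.List.foldl_congr_mem _ _ _ _ (fun acc m hm => ?_)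
        have hmt : m ≤ total + r := by
          have := List.mem_takeWhile_imp hm
          simpa using this
        simp only [reach, if_pos hmt]
        norm_num
      rw [htk]
      -- the kept part: each element is > total + r
      refine PySem.List.foldl_congr_mem _ _ _ _ (fun acc m hm => ?_)
      have hmt : total + r < m := dropWhile_gt hp m hm
      simp only [reach, if_neg (not_le.mpr hmt)]
      cases hr : reach m (total + r) rs with
      | none => simp
      | some k =>
        simp only [Option.map_some]
        congr 1
        push_cast
        ring

-- getElem? of the write fold, position never written
theorem W1 (midx : PySem.Dict Int Int) (revs : List Int) (j : Nat) :
    ∀ (l : List Int) (ans : List Int), (∀ m ∈ l, (midx.getD m 0).toNat ≠ j) →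
    (List.foldl (fun a m => match reach m 0 revs with
       | some k => a.set (midx.getD m 0).toNat ((k : Int) + 1)
       | none => a) ans l)[j]? = ans[j]? := by
  intro l
  induction l with
  | nil => intro ans _; rfl
  | cons m l ih =>
    intro ans h
    rw [List.foldl_cons]
    have hm := h m List.mem_cons_self
    have htail : ∀ x ∈ l, (midx.getD x 0).toNat ≠ j := fun x hx => h x (List.mem_cons_of_mem _ hx)
    cases hr : reach m 0 revs with
    | none => exact ih _ htail
    | some k =>
      rw [ih _ htail]
      simp [List.getElem?_set, hm]

-- getElem? of the write fold: once the slot holds v and every writer to it writes v, it stays v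
theorem W2' (midx : PySem.Dict Int Int) (revs : List Int) (j : Nat) (v : Int) :
    ∀ (l : List Int) (ans : List Int), ans[j]? = some v →
    (∀ m ∈ l, (midx.getD m 0).toNat = j → Fval revs m = v) →
    (List.foldl (fun a m => match reach m 0 revs with
       | some k => a.set (midx.getD m 0).toNat ((k : Int) + 1)
       | none => a) ans l)[j]? = some v := by
  intro l
  induction l with
  | nil => intro ans hv _; exact hv
  | cons m l ih =>
    intro ans hv h
    rw [List.foldl_cons]
    have htail : ∀ x ∈ l, (midx.getD x 0).toNat = j → Fval revs x = v :=
      fun x hx => h x (List.mem_cons_of_mem _ hx)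
    cases hr : reach m 0 revs with
    | none => exact ih _ hv htail
    | some k =>
      by_cases hj : (midx.getD m 0).toNat = j
      · have hFv : Fval revs m = v := h m List.mem_cons_self hj
        have hvk : (k : Int) + 1 = v := by simpa [Fval, hr] using hFv
        refine ih _ ?_ htail
        rw [hj, List.getElem?_set_self, hvk]
        exact (List.getElem?_eq_some_iff.1 hv).choose
      · refine ih _ ?_ htail
        rw [← hv]
        simp [List.getElem?_set, hj]

-- getElem? of the write fold: slot starts at -1, some writer targets it, all its writers agree on v
theorem W2 (midx : PySem.Dict Int Int) (revs : List Int) (j : Nat) (v : Int) :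
    ∀ (l : List Int) (ans : List Int), ans[j]? = some (-1) →
    (∀ m ∈ l, (midx.getD m 0).toNat = j → Fval revs m = v) →
    (∃ m ∈ l, (midx.getD m 0).toNat = j) →
    (List.foldl (fun a m => match reach m 0 revs with
       | some k => a.set (midx.getD m 0).toNat ((k : Int) + 1)
       | none => a) ans l)[j]? = some v := by
  intro l
  induction l with
  | nil => intro ans _ _ hex; simp at hex
  | cons m l ih =>
    intro ans h1 h2 hex
    rw [List.foldl_cons]
    have htail : ∀ x ∈ l, (midx.getD x 0).toNat = j → Fval revs x = v :=
      fun x hx => h2 x (List.mem_cons_of_mem _ hx)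
    by_cases hj : (midx.getD m 0).toNat = j
    · have hFv : Fval revs m = v := h2 m List.mem_cons_self hj
      cases hr : reach m 0 revs with
      | none =>
        have hv : v = -1 := by
          have := hFv.symm
          simpa [Fval, hr] using this
        exact W2' midx revs j v l ans (by rw [hv]; exact h1) htail
      | some k =>
        have hvk : (k : Int) + 1 = v := by simpa [Fval, hr] using hFv
        refine W2' midx revs j v l _ ?_ htail
        rw [hj, List.getElem?_set_self, hvk]
        exact (List.getElem?_eq_some_iff.1 h1).choose
    · have hex' : ∃ x ∈ l, (midx.getD x 0).toNat = j := by
        rcases hex with ⟨m0, hm0, hpj⟩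
        rcases List.mem_cons.1 hm0 with h | h
        · exact absurd (h ▸ hpj) hj
        · exact ⟨m0, h, hpj⟩
      cases hr : reach m 0 revs with
      | none => exact ih _ h1 htail hex'
      | some k =>
        refine ih _ ?_ htail hex'
        rw [← h1]
        simp [List.getElem?_set, hj]

theorem portA_unfold (revs ms : List Int) :
    getMilestoneDays revs ms =
      ((PySem.List.enumerate revs 0).foldl
        (stepA ((PySem.List.enumerate ms 0).foldl (fun d p => d.insert p.2 p.1)
          (PySem.Dict.empty : PySem.Dict Int Int)))
        (0, (PySem.List.sorted ms (fun x => x) false).reverse,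
         List.replicate ((PySem.List.sorted ms (fun x => x) false).reverse.length)
           (-1 : Int))).2.2 := rfl

-- A's output, index by index, as the write fold over the sorted milestones
theorem portA_getElem? (revs ms : List Int) (j : Nat) :
    (getMilestoneDays revs ms)[j]? =
      (List.foldl (fun a m => match reach m 0 revs with
         | some k => a.set ((((PySem.List.enumerate ms 0).foldl (fun d p => d.insert p.2 p.1)
             (PySem.Dict.empty : PySem.Dict Int Int)).getD m 0)).toNat ((k : Int) + 1)
         | none => a)
        (List.replicate ms.length (-1 : Int))
        (PySem.List.sorted ms (fun x => x) false))[j]? := by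
  have hpair : ((PySem.List.sorted ms (fun x => x) false).reverse).reverse.Pairwise (· ≤ ·) := by
    rw [List.reverse_reverse]
    exact PySem.List.sorted_pairwise ms (fun x => x)
  rw [portA_unfold, dayLoop_eq _ revs 0 0 _ _ hpair, List.reverse_reverse]
  have hconv := PySem.List.foldl_congr_mem (PySem.List.sorted ms (fun x => x) false)
    (fun (a : List Int) m => match reach m 0 revs with
       | some k => a.set ((((PySem.List.enumerate ms 0).foldl (fun d p => d.insert p.2 p.1)
           (PySem.Dict.empty : PySem.Dict Int Int)).getD m 0)).toNat ((0 : Int) + (k : Int) + 1)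
       | none => a)
    (fun (a : List Int) m => match reach m 0 revs with
       | some k => a.set ((((PySem.List.enumerate ms 0).foldl (fun d p => d.insert p.2 p.1)
           (PySem.Dict.empty : PySem.Dict Int Int)).getD m 0)).toNat ((k : Int) + 1)
       | none => a)
    (List.replicate ((PySem.List.sorted ms (fun x => x) false).reverse.length) (-1 : Int))
    (fun acc m _ => by
      cases hr : reach m 0 revs with
      | none => simp
      | some k => norm_num)
  rw [hconv]
  congr 2
  simp [PySem.List.length_sorted]

-- any fold of A's writer over a list with the same members as ms, index by index
theorem writeFold_getElem? (revs ms l : List Int) (hl : ∀ x, x ∈ l ↔ x ∈ ms) (j : Nat) :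
    (l.foldl (fun a m => match reach m 0 revs with
       | some k => a.set ((((PySem.List.enumerate ms 0).foldl (fun d p => d.insert p.2 p.1)
           (PySem.Dict.empty : PySem.Dict Int Int)).getD m 0)).toNat ((k : Int) + 1)
       | none => a)
      (List.replicate ms.length (-1 : Int)))[j]? =
    ms[j]?.map (fun m => if m ∈ ms.drop (j + 1) then (-1 : Int) else Fval revs m) := by
  set midx := (PySem.List.enumerate ms 0).foldl (fun d p => d.insert p.2 p.1)
    (PySem.Dict.empty : PySem.Dict Int Int) with hmidx
  have hpos : ∀ m ∈ ms, (midx.getD m 0).toNat = lastIdx m ms := fun m hm => posA_eq hm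
  by_cases hj : j < ms.length
  · have hms : ms[j]? = some ms[j] := List.getElem?_eq_getElem hj
    rw [hms]
    simp only [Option.map_some]
    by_cases hmem : ms[j] ∈ ms.drop (j + 1)
    · rw [if_pos hmem]
      have hnw : ∀ m ∈ l, (midx.getD m 0).toNat ≠ j := by
        intro m hm hpj
        have hmms : m ∈ ms := (hl m).1 hm
        rw [hpos m hmms] at hpj
        have hgm : ms[j]? = some m := hpj ▸ getElem?_lastIdx hmms
        have hmj : m = ms[j] := by rw [hms] at hgm; exact (Option.some.inj hgm).symm
        have hnd := not_mem_drop_lastIdx (x := m) (l := ms)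
        rw [hpj, hmj] at hnd
        exact hnd hmem
      rw [W1 midx revs j _ _ hnw]
      simp [List.getElem?_replicate, hj]
    · rw [if_neg hmem]
      have hlast : lastIdx ms[j] ms = j := (lastIdx_unique hms hmem).symm
      refine W2 midx revs j _ _ _ ?_ ?_ ?_
      · simp [List.getElem?_replicate, hj]
      · intro m hm hpj
        have hmms : m ∈ ms := (hl m).1 hm
        rw [hpos m hmms] at hpj
        have hgm : ms[j]? = some m := hpj ▸ getElem?_lastIdx hmms
        have hmj : m = ms[j] := by rw [hms] at hgm; exact (Option.some.inj hgm).symm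
        rw [hmj]
      · refine ⟨ms[j], (hl _).2 (List.getElem_mem hj), ?_⟩
        rw [hpos _ (List.getElem_mem hj), hlast]
  · have hms : ms[j]? = none := List.getElem?_eq_none (Nat.le_of_not_lt hj)
    rw [hms]
    have hnw : ∀ m ∈ l, (midx.getD m 0).toNat ≠ j := by
      intro m hm hpj
      have hmms : m ∈ ms := (hl m).1 hm
      rw [hpos m hmms] at hpj
      have := lastIdx_lt hmms
      omega
    rw [W1 midx revs j _ _ hnw]
    simp [List.getElem?_replicate]
    omega

theorem portB_unfold (revs ms : List Int) :
    getMilestoneDays_alt revs ms =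
      ((PySem.List.enumerate ms 0).foldl (fun d p => d.insert p.2 p.1)
        (PySem.Dict.empty : PySem.Dict Int Int)).items.foldl
        (fun ans p => scanB p.1 p.2 0 ans (PySem.List.enumerate revs 0))
        (List.replicate ms.length (-1 : Int)) := rfl

-- B's output, index by index
theorem portB_getElem? (revs ms : List Int) (j : Nat) :
    (getMilestoneDays_alt revs ms)[j]? =
    ms[j]?.map (fun m => if m ∈ ms.drop (j + 1) then (-1 : Int) else Fval revs m) := by
  set midx := (PySem.List.enumerate ms 0).foldl (fun d p => d.insert p.2 p.1)
    (PySem.Dict.empty : PySem.Dict Int Int) with hmidx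
  have hnodup : midx.keys.Nodup := by
    rw [hmidx]
    exact PySem.Dict.nodup_keys_foldl_insert_key _ Prod.snd (fun _ p => p.1) _
      (by simp [PySem.Dict.keys_empty])
  have hkeysEq : midx.keys = PySem.Set.update
      ((PySem.Dict.empty : PySem.Dict Int Int)).keys
      ((PySem.List.enumerate ms 0).map Prod.snd) := by
    rw [hmidx]
    exact PySem.Dict.keys_foldl_insert_key _ Prod.snd (fun _ p => p.1) _
  have hkeys : ∀ x, x ∈ midx.keys ↔ x ∈ ms := by
    intro x
    rw [hkeysEq]
    simp [PySem.Set.mem_update, PySem.Dict.keys_empty, PySem.List.map_snd_enumerate]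
  rw [portB_unfold, ← hmidx, PySem.Dict.items_eq_map_keys midx hnodup 0, List.foldl_map]
  have hconv := PySem.List.foldl_congr_mem midx.keys
    (fun (ans : List Int) k => scanB k (midx.getD k 0) 0 ans (PySem.List.enumerate revs 0))
    (fun (ans : List Int) m => match reach m 0 revs with
       | some k => ans.set ((midx.getD m 0)).toNat ((k : Int) + 1)
       | none => ans)
    (List.replicate ms.length (-1 : Int))
    (fun ans k _ => by
      dsimp only
      rw [scanB_eq]
      cases hr : reach k 0 revs with
      | none => simp
      | some k' => norm_num)
  rw [hconv]
  exact writeFold_getElem? revs ms midx.keys hkeys j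

-- ===== VERDICT (by name: the statement is the Claim_ definition above) =====
theorem getMilestoneDays_spec : Claim_equal_getMilestoneDays := by
  unfold Claim_equal_getMilestoneDays Spec_getMilestoneDays
  intro revs ms _
  refine List.ext_getElem? (fun j => ?_)
  rw [portB_getElem? revs ms j, portA_getElem?]
  exact writeFold_getElem? revs ms _
    (fun x => PySem.List.mem_sorted ms (fun x => x) false x) j
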